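-- pv_equiv track=rewrite | github.com/secondgitaccount/aoc2015 | dia5/__init__.py | solucao2
-- ===== SOURCE A (Python) =====
-- def trios_letras(string):
--     return [*zip(string[:-2],
--                  string[1:-1],
--                  string[2:])]
--
-- def pares_letras(string):
--     pares = []
--     for i, _ in enumerate(string[:-1]):
--         pares.append((string[i:i+2], i, i+1))
--
--     return pares
--
-- def contem_pares_repetidos(string):
--     pares = pares_letras(string)
--     for i, (p1, c1, f1) in enumerate(pares, 1):
--         for (p2, c2, f2) in pares[i:]:
--             if p1 == p2 and not c2 in [c1, f1]:
--                 return True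
--
--     return False
--
-- def solucao2(strings):
--     total = 0
--     for string in strings:
--         contem_trio = any(filter(lambda t: t[0] == t[2], trios_letras(string)))
--         pares_repetidos = contem_pares_repetidos(string)
--
--         if pares_repetidos and contem_trio:
--             total += 1
--
--     return total
-- ===== SOURCE B (Python) =====
-- def _has_xyx(s):
--     for i in range(len(s) - 2):
--         if s[i] == s[i + 2]:
--             return True
--     return False
--
--
-- def _has_repeated_pair(s):
--     first = {}
--     for i in range(len(s) - 1):
--         p = (s[i], s[i + 1])
--         j = first.get(p)
--         if j is None:
--             first[p] = i
--         elif i - j >= 2: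
--             return True
--     return False
--
--
-- def solucao2(strings):
--     total = 0
--     for s in strings:
--         if _has_xyx(s) and _has_repeated_pair(s):
--             total += 1
--     return total
-- ===== Notes on version B (the rewrite author's own statement) =====
-- stated objective: faster
-- what changed: A builds the full pair list and compares all pairs of entries in a quadratic nested scan (and filters a zipped triple list); B makes one pass per string, keeping a dict from each adjacent character pair to its first occurrence index and reporting a repeat as soon as a later occurrence at distance >= 2 is seen.
import Mathlib
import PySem

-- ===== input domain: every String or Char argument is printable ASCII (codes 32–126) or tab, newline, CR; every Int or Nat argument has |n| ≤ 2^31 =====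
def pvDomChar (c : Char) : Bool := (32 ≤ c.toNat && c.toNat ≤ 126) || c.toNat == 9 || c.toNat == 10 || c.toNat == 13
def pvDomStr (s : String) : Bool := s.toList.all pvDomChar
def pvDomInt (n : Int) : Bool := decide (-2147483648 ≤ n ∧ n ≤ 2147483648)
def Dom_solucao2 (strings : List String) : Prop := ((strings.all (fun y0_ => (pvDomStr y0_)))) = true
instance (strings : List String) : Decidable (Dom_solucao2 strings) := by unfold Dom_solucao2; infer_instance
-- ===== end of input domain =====

-- B replaces A's quadratic all-pairs scan over the pair list by a one-pass dict of the first
-- occurrence of each adjacent character pair (objective: faster).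

-- ===== PORT A =====
-- trios_letras: zip(s[:-2], s[1:-1], s[2:]); a Python 3-tuple is the right-nested pair (a, (b, c)).
def triosLetras (l : List Char) : List (Char × Char × Char) :=
  (PySem.List.slice l none (some (-2))).zip
    ((PySem.List.slice l (some 1) (some (-1))).zip (PySem.List.slice l (some 2) none))

-- pares_letras: [(s[i:i+2], i, i+1) for i, _ in enumerate(s[:-1])]
def paresLetras (l : List Char) : List (List Char × Int × Int) :=
  (PySem.List.enumerate (PySem.List.slice l none (some (-1)))).map
    (fun ix => (PySem.List.slice l (some ix.1) (some (ix.1 + 2)), ix.1, ix.1 + 1))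

-- the nested loop of contem_pares_repetidos: each element is checked against the rest (pares[i:]);
-- 'c2 in [c1, f1]' is the two-element membership test, ported as the disjunction of equalities.
def cprAux : List (List Char × Int × Int) → Bool
  | [] => false
  | (p1, c1, f1) :: rest =>
      rest.any (fun q => q.1 == p1 && !(q.2.1 == c1 || q.2.1 == f1)) || cprAux rest

def contemParesRepetidos (l : List Char) : Bool := cprAux (paresLetras l)

def solucao2 (strings : List String) : Int :=
  strings.foldl
    (fun total string =>
      -- any(filter(pred, xs)) is True exactly when the filtered list is non-empty
      let contemTrio := !(((triosLetras string.toList).filter (fun t => t.1 == t.2.2)).isEmpty)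
      let paresRepetidos := contemParesRepetidos string.toList
      if paresRepetidos && contemTrio then total + 1 else total)
    0

-- ===== PORT B =====
-- for i in range(len(s) - 2): if s[i] == s[i + 2]: return True  (every index produced by the
-- range is in bounds, so s[i] is ported as getD with an arbitrary default character)
def hasXyxAux (l : List Char) : List Nat → Bool
  | [] => false
  | i :: rest => if l.getD i ' ' == l.getD (i + 2) ' ' then true else hasXyxAux l rest

def hasXyx (l : List Char) : Bool := hasXyxAux l (List.range (l.length - 2))

-- p = (s[i], s[i + 1]), the dict key of Source B
def pairAt (l : List Char) (i : Nat) : Char × Char := (l.getD i ' ', l.getD (i + 1) ' ')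

-- the dict 'first' maps each pair to the index of its first occurrence; a later occurrence at
-- distance ≥ 2 is a non-overlapping repeat
def hasRepAux (l : List Char) : List Nat → PySem.Dict (Char × Char) Int → Bool
  | [], _ => false
  | i :: rest, d =>
      match d.get? (pairAt l i) with
      | none => hasRepAux l rest (d.insert (pairAt l i) (i : Int))
      | some j => if (i : Int) - j ≥ 2 then true else hasRepAux l rest d

def hasRepeatedPair (l : List Char) : Bool :=
  hasRepAux l (List.range (l.length - 1)) PySem.Dict.empty

def solucao2_alt (strings : List String) : Int :=
  strings.foldl
    (fun total s => if hasXyx s.toList && hasRepeatedPair s.toList then total + 1 else total)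
    0

-- ===== PRECONDITION & SPEC =====
def Spec_solucao2 (strings : List String) (out : Int) : Prop := out = solucao2_alt strings
instance (strings : List String) (out : Int) : Decidable (Spec_solucao2 strings out) := by unfold Spec_solucao2; infer_instance

-- ===== CLAIM (what is proved, stated in full; the proofs are below) =====
def Claim_equal_solucao2 : Prop := ∀ (strings : List String), Dom_solucao2 strings → Spec_solucao2 strings (solucao2 strings)

-- ===== LEMMAS AND PROOFS =====

-- "some character repeats two positions later" (the xyx condition)
def TrioProp (l : List Char) : Prop :=
  ∃ i : Nat, i + 2 < l.length ∧ l.getD i ' ' = l.getD (i + 2) ' '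

-- "some adjacent pair occurs again at distance ≥ 2"
def PairProp (l : List Char) : Prop :=
  ∃ k1 k2 : Nat, k1 + 2 ≤ k2 ∧ k2 + 1 < l.length ∧ pairAt l k1 = pairAt l k2

lemma hasXyxAux_eq_any (l : List Char) (ks : List Nat) :
    hasXyxAux l ks = ks.any (fun i => l.getD i ' ' == l.getD (i + 2) ' ') := by
  induction ks with
  | nil => rfl
  | cons i rest ih =>
      rw [show hasXyxAux l (i :: rest) =
        (if l.getD i ' ' == l.getD (i + 2) ' ' then true else hasXyxAux l rest) from rfl,
        List.any_cons, ih]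
      cases h : (l.getD i ' ' == l.getD (i + 2) ' ') <;> simp

lemma hasXyx_iff (l : List Char) : hasXyx l = true ↔ TrioProp l := by
  unfold hasXyx TrioProp
  rw [hasXyxAux_eq_any, List.any_eq_true]
  constructor
  · rintro ⟨i, hi, h⟩
    rw [List.mem_range] at hi
    exact ⟨i, by omega, by simpa using h⟩
  · rintro ⟨i, hi, h⟩
    exact ⟨i, List.mem_range.mpr (by omega), by simpa using h⟩

lemma take_two_drop (l : List Char) (k : Nat) (h : k + 1 < l.length) :
    (l.drop k).take 2 = [l.getD k ' ', l.getD (k + 1) ' '] := by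
  have h1 : k < l.length := by omega
  rw [List.getD_eq_getElem l ' ' h1, List.getD_eq_getElem l ' ' h,
    List.drop_eq_getElem_cons h1, List.drop_eq_getElem_cons h]
  rfl

lemma filter_isEmpty {α : Type} (p : α → Bool) (xs : List α) :
    (xs.filter p).isEmpty = !xs.any p := by
  induction xs with
  | nil => rfl
  | cons a t ih => by_cases h : p a <;> simp [List.filter_cons, h, ih]

lemma slice_mid (l : List Char) :
    PySem.List.slice l (some 1) (some (-1)) = (l.drop 1).take (l.length - 2) := by
  rcases l with _ | ⟨a, t⟩
  · rfl
  · simp [PySem.List.slice, PySem.List.clampIdx]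
    congr 1
    split_ifs <;> omega

lemma contemTrio_iff (l : List Char) :
    (!(((triosLetras l).filter (fun t => t.1 == t.2.2)).isEmpty)) = true ↔ TrioProp l := by
  rw [filter_isEmpty, Bool.not_not, List.any_eq_true]
  unfold triosLetras TrioProp
  rw [PySem.List.slice_to_neg_ofNat l 2 (by norm_num), slice_mid,
    show PySem.List.slice l (some 2) none = l.drop 2 by
      simpa using PySem.List.slice_from l (a := 2) (by norm_num)]
  constructor
  · rintro ⟨t, ht, hp⟩
    obtain ⟨i, hi, rfl⟩ := List.mem_iff_getElem.mp ht
    have hlen : i + 2 < l.length := by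
      simp [List.length_zip, List.length_take, List.length_drop] at hi
      omega
    refine ⟨i, hlen, ?_⟩
    simp only [List.getElem_zip, List.getElem_take, List.getElem_drop] at hp
    rw [List.getD_eq_getElem l ' ' (by omega), List.getD_eq_getElem l ' ' (by omega)]
    have e : 2 + i = i + 2 := by omega
    simpa [e] using hp
  · rintro ⟨i, hi, h⟩
    refine ⟨(l[i]'(by omega), l[i + 1]'(by omega), l[i + 2]'(by omega)), ?_, ?_⟩
    · apply List.mem_iff_getElem.mpr
      refine ⟨i, ?_, ?_⟩
      · simp [List.length_zip, List.length_take, List.length_drop]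
        omega
      · simp [List.getElem_zip, List.getElem_take, List.getElem_drop,
          show 1 + i = i + 1 from by omega, show 2 + i = i + 2 from by omega]
    · rw [List.getD_eq_getElem l ' ' (by omega), List.getD_eq_getElem l ' ' (by omega)] at h
      simpa using h

lemma paresLetras_eq (l : List Char) :
    paresLetras l = (List.range (l.length - 1)).map
      (fun k => ((l.drop k).take 2, (k : Int), (k : Int) + 1)) := by
  unfold paresLetras
  rw [PySem.List.slice_to_neg_one]
  have hc : (fun (ix : Int × Char) =>
      (PySem.List.slice l (some ix.1) (some (ix.1 + 2)), ix.1, ix.1 + 1)) =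
      ((fun (i : Int) => (PySem.List.slice l (some i) (some (i + 2)), i, i + 1)) ∘ Prod.fst) := rfl
  rw [hc, ← List.map_map, PySem.List.map_fst_enumerate, PySem.List.pyRange_one]
  rw [List.map_map]
  rw [show ((0 : Int) + (l.dropLast.length : Int) - 0).toNat = l.length - 1 by
    simp]
  apply List.map_congr_left
  intro k hk
  simp only [Function.comp_apply, zero_add]
  rw [show ((k : Int) + 2) = (((k + 2 : Nat)) : Int) from by push_cast; ring,
    PySem.List.slice_natCast, show k + 2 - k = 2 from by omega]

lemma cprAux_iff (ys : List (List Char × Int × Int)) :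
    cprAux ys = true ↔ ∃ x y, ([x, y] : List (List Char × Int × Int)).Sublist ys ∧
      (y.1 == x.1 && !(y.2.1 == x.2.1 || y.2.1 == x.2.2)) = true := by
  induction ys with
  | nil =>
      simp [cprAux]
  | cons a rest ih =>
      obtain ⟨p1, c1, f1⟩ := a
      rw [show cprAux ((p1, c1, f1) :: rest) =
        (rest.any (fun q => q.1 == p1 && !(q.2.1 == c1 || q.2.1 == f1)) || cprAux rest) from rfl]
      rw [Bool.or_eq_true, List.any_eq_true, ih]
      constructor
      · rintro (⟨q, hq, hpred⟩ | ⟨x, y, hsub, hpred⟩)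
        · exact ⟨(p1, c1, f1), q,
            List.cons_sublist_cons.mpr (List.singleton_sublist.mpr hq), hpred⟩
        · exact ⟨x, y, hsub.trans (List.sublist_cons_self _ _), hpred⟩
      · rintro ⟨x, y, hsub, hpred⟩
        rcases List.sublist_cons_iff.mp hsub with h | ⟨r, hr, hrsub⟩
        · exact Or.inr ⟨x, y, h, hpred⟩
        · injection hr with h1 h2
          subst h1
          subst h2
          exact Or.inl ⟨y, List.singleton_sublist.mp hrsub, hpred⟩

lemma pair_sublist_map_range {β : Type} (g : Nat → β) (m : Nat) (x y : β) :
    ([x, y] : List β).Sublist ((List.range m).map g) ↔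
      ∃ k1 k2 : Nat, k1 < k2 ∧ k2 < m ∧ x = g k1 ∧ y = g k2 := by
  constructor
  · intro h
    rcases List.sublist_map_iff.mp h with ⟨l', hsub, heq⟩
    rcases l' with _ | ⟨k1, _ | ⟨k2, _ | _⟩⟩ <;> simp at heq
    obtain ⟨hx, hy⟩ := heq
    have hpw : ([k1, k2] : List Nat).Pairwise (· < ·) :=
      (List.pairwise_lt_range).sublist hsub
    have hk12 : k1 < k2 := by
      simp [List.pairwise_cons] at hpw
      exact hpw
    have hk2m : k2 < m := List.mem_range.mp (hsub.subset (by simp))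
    exact ⟨k1, k2, hk12, hk2m, hx, hy⟩
  · rintro ⟨k1, k2, h12, h2m, rfl, rfl⟩
    have h1 : ([k1, k2] : List Nat).Sublist (List.range (k2 + 1)) := by
      rw [List.range_succ]
      exact List.Sublist.append (List.singleton_sublist.mpr (List.mem_range.mpr h12))
        (List.Sublist.refl _)
    have h2 : ([k1, k2] : List Nat).Sublist (List.range m) :=
      h1.trans (List.range_sublist.mpr (by omega))
    simpa using h2.map g

lemma contemParesRepetidos_iff (l : List Char) :
    contemParesRepetidos l = true ↔ PairProp l := by
  unfold contemParesRepetidos PairProp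
  rw [cprAux_iff, paresLetras_eq]
  constructor
  · rintro ⟨x, y, hsub, hpred⟩
    rcases (pair_sublist_map_range _ _ _ _).mp hsub with ⟨k1, k2, h12, h2m, rfl, rfl⟩
    simp only [Bool.and_eq_true, Bool.not_eq_true', Bool.or_eq_false_iff, beq_iff_eq,
      beq_eq_false_iff_ne, ne_eq, Nat.cast_inj] at hpred
    obtain ⟨hpe, hne1, hne2⟩ := hpred
    have hk2 : k2 + 2 ≤ k2 + 2 := le_refl _
    have hgap : k1 + 2 ≤ k2 := by
      have : (k2 : Int) ≠ (k1 : Int) + 1 := hne2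
      omega
    refine ⟨k1, k2, hgap, by omega, ?_⟩
    rw [take_two_drop l k1 (by omega), take_two_drop l k2 (by omega)] at hpe
    simp only [List.cons.injEq, and_true] at hpe
    unfold pairAt
    rw [hpe.1, hpe.2]
  · rintro ⟨k1, k2, h12, h2n, hpair⟩
    refine ⟨((l.drop k1).take 2, (k1 : Int), (k1 : Int) + 1),
      ((l.drop k2).take 2, (k2 : Int), (k2 : Int) + 1), ?_, ?_⟩
    · exact (pair_sublist_map_range _ _ _ _).mpr ⟨k1, k2, by omega, by omega, rfl, rfl⟩
    · rw [take_two_drop l k1 (by omega), take_two_drop l k2 (by omega)]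
      have e1 : l.getD k1 ' ' = l.getD k2 ' ' := congrArg Prod.fst hpair
      have e2 : l.getD (k1 + 1) ' ' = l.getD (k2 + 1) ' ' := congrArg Prod.snd hpair
      simp only [Bool.and_eq_true, beq_iff_eq, Bool.not_eq_true', Bool.or_eq_false_iff,
        beq_eq_false_iff_ne, ne_eq, List.cons.injEq, and_true]
      refine ⟨⟨e1.symm, e2.symm⟩, ?_, ?_⟩ <;> omega

lemma hasRepAux_iff (l : List Char) (c : Nat) : ∀ (k : Nat) (d : PySem.Dict (Char × Char) Int),
    (∀ p j, d.get? p = some j ↔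
      ∃ jn : Nat, j = (jn : Int) ∧ jn < k ∧ pairAt l jn = p ∧ ∀ m, m < jn → pairAt l m ≠ p) →
    (∀ k1 k2, k1 + 2 ≤ k2 → k2 < k → pairAt l k1 ≠ pairAt l k2) →
    (hasRepAux l (List.range' k c) d = true ↔
      ∃ k1 k2 : Nat, k1 + 2 ≤ k2 ∧ k2 < k + c ∧ pairAt l k1 = pairAt l k2) := by
  induction c with
  | zero =>
      intro k d _ hno
      rw [List.range'_zero]
      refine iff_of_false (by simp [hasRepAux]) ?_
      rintro ⟨k1, k2, h1, h2, h3⟩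
      exact hno k1 k2 h1 (by omega) h3
  | succ c ih =>
      intro k d hd hno
      rw [List.range'_succ]
      show (match d.get? (pairAt l k) with
        | none => hasRepAux l (List.range' (k + 1) c) (d.insert (pairAt l k) (k : Int))
        | some j => if (k : Int) - j ≥ 2 then true else hasRepAux l (List.range' (k + 1) c) d) = true ↔ _
      cases hg : d.get? (pairAt l k) with
      | none =>
          show hasRepAux l (List.range' (k + 1) c) (d.insert (pairAt l k) (k : Int)) = true ↔ _
          have hocc : ∀ m, m < k → pairAt l m ≠ pairAt l k := by
            intro m hm heq
            have hex : ∃ n, pairAt l n = pairAt l k := ⟨m, heq⟩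
            have hm0 : pairAt l (Nat.find hex) = pairAt l k := Nat.find_spec hex
            have hmin : ∀ j, j < Nat.find hex → pairAt l j ≠ pairAt l k :=
              fun j hj => Nat.find_min hex hj
            have hle : Nat.find hex ≤ m := Nat.find_min' hex heq
            have : d.get? (pairAt l k) = some ((Nat.find hex : Nat) : Int) :=
              (hd _ _).mpr ⟨Nat.find hex, rfl, by omega, hm0, fun j hj hj2 => hmin j hj hj2⟩
            rw [hg] at this
            simp at this
          have hd' : ∀ p j, (d.insert (pairAt l k) (k : Int)).get? p = some j ↔
              ∃ jn : Nat, j = (jn : Int) ∧ jn < k + 1 ∧ pairAt l jn = p ∧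
                ∀ m, m < jn → pairAt l m ≠ p := by
            intro p j
            rw [PySem.Dict.get?_insert]
            split_ifs with hp
            · subst hp
              constructor
              · intro h
                exact ⟨k, (Option.some.inj h).symm, by omega, rfl, fun m hm => hocc m hm⟩
              · rintro ⟨jn, rfl, hjn, hpair, _⟩
                have : jn = k := by
                  by_contra hne
                  exact hocc jn (by omega) hpair
                subst this
                rfl
            · rw [hd p j]
              constructor
              · rintro ⟨jn, rfl, hjn, hpair, hmin⟩
                exact ⟨jn, rfl, by omega, hpair, hmin⟩
              · rintro ⟨jn, rfl, hjn, hpair, hmin⟩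
                have hne : jn ≠ k := by
                  intro h
                  subst h
                  exact hp hpair.symm
                exact ⟨jn, rfl, by omega, hpair, hmin⟩
          have hno' : ∀ k1 k2, k1 + 2 ≤ k2 → k2 < k + 1 → pairAt l k1 ≠ pairAt l k2 := by
            intro k1 k2 h1 h2
            by_cases hk : k2 < k
            · exact hno k1 k2 h1 hk
            · have : k2 = k := by omega
              subst this
              exact hocc k1 (by omega)
          rw [ih (k + 1) _ hd' hno']
          constructor <;> rintro ⟨k1, k2, h1, h2, h3⟩ <;> exact ⟨k1, k2, h1, by omega, h3⟩
      | some j =>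
          obtain ⟨jn, rfl, hjn, hpair, hmin⟩ := (hd _ j).mp hg
          show (if (k : Int) - (jn : Int) ≥ 2 then true
            else hasRepAux l (List.range' (k + 1) c) d) = true ↔ _
          by_cases hge : ((k : Int) - (jn : Int) ≥ 2)
          · rw [if_pos hge]
            refine iff_of_true rfl ?_
            exact ⟨jn, k, by omega, by omega, hpair⟩
          · rw [if_neg hge]
            have hd' : ∀ p' j', d.get? p' = some j' ↔
                ∃ jn' : Nat, j' = (jn' : Int) ∧ jn' < k + 1 ∧ pairAt l jn' = p' ∧
                  ∀ m, m < jn' → pairAt l m ≠ p' := by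
              intro p' j'
              rw [hd p' j']
              constructor
              · rintro ⟨jn', rfl, h1, h2, h3⟩
                exact ⟨jn', rfl, by omega, h2, h3⟩
              · rintro ⟨jn', rfl, h1, h2, h3⟩
                refine ⟨jn', rfl, ?_, h2, h3⟩
                by_contra hgt
                have hjk : jn' = k := by omega
                subst hjk
                exact h3 jn (by omega) (hpair.trans h2)
            have hno' : ∀ k1 k2, k1 + 2 ≤ k2 → k2 < k + 1 → pairAt l k1 ≠ pairAt l k2 := by
              intro k1 k2 h1 h2 heq
              by_cases hk : k2 < k
              · exact hno k1 k2 h1 hk heq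
              · have : k2 = k := by omega
                subst this
                have hjle : jn ≤ k1 := by
                  by_contra hlt
                  exact hmin k1 (by omega) heq
                omega
            rw [ih (k + 1) d hd' hno']
            constructor <;> rintro ⟨k1, k2, h1, h2, h3⟩ <;> exact ⟨k1, k2, h1, by omega, h3⟩

lemma hasRepeatedPair_iff (l : List Char) : hasRepeatedPair l = true ↔ PairProp l := by
  unfold hasRepeatedPair PairProp
  rw [List.range_eq_range']
  rw [hasRepAux_iff l (l.length - 1) 0 PySem.Dict.empty
    (by
      intro p j
      refine iff_of_false (by simp [PySem.Dict.get?_empty]) ?_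
      rintro ⟨jn, _, h, _⟩
      omega)
    (by
      intro k1 k2 _ h
      omega)]
  constructor <;> rintro ⟨k1, k2, h1, h2, h3⟩ <;> exact ⟨k1, k2, h1, by omega, h3⟩

lemma cond_eq (l : List Char) :
    (contemParesRepetidos l && !(((triosLetras l).filter (fun t => t.1 == t.2.2)).isEmpty)) =
      (hasXyx l && hasRepeatedPair l) := by
  rw [Bool.eq_iff_iff]
  simp only [Bool.and_eq_true]
  rw [contemParesRepetidos_iff, contemTrio_iff, hasXyx_iff, hasRepeatedPair_iff]
  tauto

-- ===== VERDICT (by name: the statement is the Claim_ definition above) =====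
theorem solucao2_spec : Claim_equal_solucao2 := by
  intro strings _
  unfold Spec_solucao2 solucao2 solucao2_alt
  apply PySem.List.foldl_congr_mem
  intro acc s _
  simp only [cond_eq]
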